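-- pv_equiv track=rewrite | github.com/kitae0522/Make_BOJ_Table | boj/11399.py | ATM
-- ===== SOURCE A (Python) =====
-- def sort_number(num_list):
--     for x in range(len(num_list) - 1):
--         for y in range(len(num_list) - 1):
--             if num_list[y] > num_list[y + 1]:
--                 num_list[y], num_list[y + 1] = num_list[y + 1], num_list[y]
--             elif num_list[y] == num_list[y+1]:
--                 num_list[y], num_list[y+1] = num_list[y], num_list[y+1]
--
--     return num_list
--
-- def ATM(size, num_list):
--     if size == 1:
--         return num_list[0]
--     else:
--         num_list = sort_number(num_list)
--         i_sum = 0
--         min_sum = 0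
--
--         for i in range(size):
--             min_sum += (i_sum + num_list[i])
--             i_sum += num_list[i]
--         return min_sum
-- ===== SOURCE B (Python) =====
-- def ATM(size, num_list):
--     if size == 1:
--         return num_list[0]
--     num_list.sort()
--     return sum((size - i) * num_list[i] for i in range(size))
-- ===== Notes on version B (the rewrite author's own statement) =====
-- stated objective: simpler
-- what changed: Replaces the hand-written quadratic bubble sort with list.sort() and the two-accumulator prefix-sum loop with the direct closed-form weighted sum sum((size-i)*a[i]); measurably faster via the asymptotic sort change.
import Mathlib
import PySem

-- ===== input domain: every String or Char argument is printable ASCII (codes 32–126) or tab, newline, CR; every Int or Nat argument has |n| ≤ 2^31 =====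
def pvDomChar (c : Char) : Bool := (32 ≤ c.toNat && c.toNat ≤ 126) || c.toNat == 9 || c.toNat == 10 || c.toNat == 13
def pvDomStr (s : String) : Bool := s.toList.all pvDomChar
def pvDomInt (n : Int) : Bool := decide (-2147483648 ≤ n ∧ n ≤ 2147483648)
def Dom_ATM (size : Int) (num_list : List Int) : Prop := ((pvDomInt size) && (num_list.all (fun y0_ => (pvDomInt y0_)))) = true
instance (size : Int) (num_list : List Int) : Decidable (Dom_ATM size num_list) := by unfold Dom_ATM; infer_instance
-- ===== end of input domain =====

-- B replaces A's hand-written bubble sort by list.sort() and the prefix-sum accumulator loop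
-- by the closed-form weighted sum sum((size-i)*a[i] for i in range(size)): simpler and faster.
-- (Both A and B sort num_list in place when size != 1; the theorems are about the return value.)

-- ===== PORT A =====
-- one comparison/swap step of the inner loop at index y; the Python `elif equal` branch
-- writes the same two values back, a no-op, so it is ported as the identity
def pvStep (l : List Int) (y : Nat) : List Int :=
  match l[y]?, l[y + 1]? with
  | some a, some b => if a > b then (l.set y b).set (y + 1) a else l
  | _, _ => l

-- one inner pass: for y in range(len(num_list) - 1)
def pvPass (l : List Int) : List Int :=
  (List.range (l.length - 1)).foldl pvStep l

-- sort_number: for x in range(len(num_list) - 1): <inner pass>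
def sort_number (num_list : List Int) : List Int :=
  (List.range (num_list.length - 1)).foldl (fun acc _ => pvPass acc) num_list

def ATM (size : Int) (num_list : List Int) : Int :=
  if size = 1 then PySem.List.pyGetD num_list 0 0
  else
    let s := sort_number num_list
    ((PySem.List.pyRange 0 size 1).foldl
      (fun (st : Int × Int) i =>
        (st.1 + PySem.List.pyGetD s i 0, st.2 + (st.1 + PySem.List.pyGetD s i 0)))
      (0, 0)).2

-- ===== PORT B =====
def ATM_alt (size : Int) (num_list : List Int) : Int :=
  if size = 1 then PySem.List.pyGetD num_list 0 0
  else
    let s := PySem.List.sorted num_list (fun x => x) false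
    (PySem.List.pyRange 0 size 1).foldl
      (fun acc i => acc + (size - i) * PySem.List.pyGetD s i 0) 0

-- ===== PRECONDITION & SPEC =====
-- Pre_ excludes exactly the inputs where Python A raises IndexError:
-- size = 1 with an empty list, and size > len(num_list) otherwise.
def Pre_ATM (size : Int) (num_list : List Int) : Prop :=
  (size = 1 → num_list ≠ []) ∧ (size ≠ 1 → size ≤ (num_list.length : Int))
instance (size : Int) (num_list : List Int) : Decidable (Pre_ATM size num_list) := by
  unfold Pre_ATM; infer_instance

def pvWitness_ATM : Int × List Int := (3, [3, 1, 2])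

def Spec_ATM (size : Int) (num_list : List Int) (out : Int) : Prop := out = ATM_alt size num_list
instance (size : Int) (num_list : List Int) (out : Int) : Decidable (Spec_ATM size num_list out) := by
  unfold Spec_ATM; infer_instance

-- ===== CLAIM (what is proved, stated in full; the proofs are below) =====
def Claim_equal_ATM : Prop := ∀ (size : Int) (num_list : List Int), Dom_ATM size num_list → Pre_ATM size num_list → Spec_ATM size num_list (ATM size num_list)

-- ===== LEMMAS AND PROOFS =====

-- recursive characterisation of one bubble pass
def rpass : List Int → List Int
  | [] => []
  | [a] => [a]
  | a :: b :: t => if b < a then b :: rpass (a :: t) else a :: rpass (b :: t)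

theorem pvStep_cons (c : Int) (l : List Int) (y : Nat) :
    pvStep (c :: l) (y + 1) = c :: pvStep l y := by
  simp only [pvStep, List.getElem?_cons_succ]
  cases l[y]? with
  | none => rfl
  | some a =>
    cases l[y + 1]? with
    | none => rfl
    | some b =>
      by_cases h : a > b <;> simp [h, List.set_cons_succ]

theorem foldl_pvStep_shift (ids : List Nat) :
    ∀ (c : Int) (l : List Int),
      (ids.map (· + 1)).foldl pvStep (c :: l) = c :: ids.foldl pvStep l := by
  induction ids with
  | nil => intro c l; rfl
  | cons y ys ih =>
    intro c l
    simp only [List.map_cons, List.foldl_cons, pvStep_cons, ih]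

theorem pvPass_eq_rpass : ∀ l : List Int, pvPass l = rpass l := by
  intro l
  induction l using rpass.induct with
  | case1 => simp [pvPass, rpass]
  | case2 a => simp [pvPass, rpass]
  | case3 a b t h ih =>
    simp only [pvPass] at ih ⊢
    have hlen : (a :: b :: t).length - 1 = t.length + 1 := by simp
    rw [hlen, List.range_succ_eq_map, List.foldl_cons]
    have h0 : pvStep (a :: b :: t) 0 = b :: a :: t := by
      simp [pvStep, h]
    rw [h0]
    rw [show (List.range t.length).map Nat.succ = (List.range t.length).map (· + 1) from rfl,
      foldl_pvStep_shift]
    simp only [List.length_cons, Nat.add_sub_cancel] at ih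
    rw [ih, rpass]
    simp [h]
  | case4 a b t h ih =>
    simp only [pvPass] at ih ⊢
    have hlen : (a :: b :: t).length - 1 = t.length + 1 := by simp
    rw [hlen, List.range_succ_eq_map, List.foldl_cons]
    have h0 : pvStep (a :: b :: t) 0 = a :: b :: t := by
      simp [pvStep]; omega
    rw [h0]
    rw [show (List.range t.length).map Nat.succ = (List.range t.length).map (· + 1) from rfl,
      foldl_pvStep_shift]
    simp only [List.length_cons, Nat.add_sub_cancel] at ih
    rw [ih, rpass]
    simp [h]

theorem rpass_perm : ∀ l : List Int, (rpass l).Perm l := by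
  intro l
  induction l using rpass.induct with
  | case1 => rw [rpass]
  | case2 a => rw [rpass]
  | case3 a b t h ih =>
    rw [rpass, if_pos h]
    exact ((ih.cons b).trans (List.Perm.swap a b t))
  | case4 a b t h ih =>
    rw [rpass, if_neg h]
    exact ih.cons a

theorem rpass_of_pairwise : ∀ l : List Int, l.Pairwise (· ≤ ·) → rpass l = l := by
  intro l
  induction l using rpass.induct with
  | case1 => intro _; rw [rpass]
  | case2 a => intro _; rw [rpass]
  | case3 a b t h ih =>
    intro hp
    exfalso
    have : a ≤ b := (List.pairwise_cons.1 hp).1 b (by simp)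
    omega
  | case4 a b t h ih =>
    intro hp
    rw [rpass, if_neg h, ih (List.pairwise_cons.1 hp).2]

theorem rpass_append_sorted : ∀ (u v : List Int), v.Pairwise (· ≤ ·) →
    (∀ a ∈ u, ∀ b ∈ v, a ≤ b) → rpass (u ++ v) = rpass u ++ v := by
  intro u
  induction u using rpass.induct with
  | case1 =>
    intro v hv _
    have h0 : rpass ([] : List Int) = [] := by rw [rpass]
    rw [List.nil_append, rpass_of_pairwise v hv, h0, List.nil_append]
  | case2 a =>
    intro v hv hd
    have h1 : rpass [a] = [a] := by rw [rpass]
    cases v with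
    | nil => simp [h1]
    | cons b v' =>
      have hab : a ≤ b := hd a (by simp) b (by simp)
      simp only [List.cons_append, List.nil_append, h1]
      rw [rpass, if_neg (by omega : ¬ b < a), rpass_of_pairwise _ hv]
  | case3 a b t h ih =>
    intro v hv hd
    have hd' : ∀ x ∈ a :: t, ∀ y ∈ v, x ≤ y := by
      intro x hx y hy
      apply hd x _ y hy
      rcases List.mem_cons.1 hx with h1 | h1
      · simp [h1]
      · simp [h1]
    simp only [List.cons_append]
    rw [rpass, if_pos h, show (a :: (t ++ v)) = (a :: t) ++ v from rfl, ih v hv hd']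
    rw [rpass, if_pos h, List.cons_append]
  | case4 a b t h ih =>
    intro v hv hd
    have hd' : ∀ x ∈ b :: t, ∀ y ∈ v, x ≤ y := by
      intro x hx y hy
      apply hd x _ y hy
      rcases List.mem_cons.1 hx with h1 | h1
      · simp [h1]
      · simp [h1]
    simp only [List.cons_append]
    rw [rpass, if_neg h, show (b :: (t ++ v)) = (b :: t) ++ v from rfl, ih v hv hd']
    rw [rpass, if_neg h, List.cons_append]

theorem rpass_max_last : ∀ l : List Int, l ≠ [] →
    ∃ w m, rpass l = w ++ [m] ∧ ∀ x ∈ w, x ≤ m := by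
  intro l
  induction l using rpass.induct with
  | case1 => intro h; exact absurd rfl h
  | case2 a => intro _; exact ⟨[], a, by rw [rpass]; rfl, by simp⟩
  | case3 a b t h ih =>
    intro _
    obtain ⟨w, m, hw, hm⟩ := ih (by simp)
    refine ⟨b :: w, m, ?_, ?_⟩
    · rw [rpass, if_pos h, hw]; rfl
    · intro x hx
      rcases List.mem_cons.1 hx with h1 | h1
      · subst h1
        have ha : a ∈ w ++ [m] := by
          rw [← hw]; exact (rpass_perm _).mem_iff.2 (by simp)
        rcases List.mem_append.1 ha with h2 | h2
        · exact le_of_lt (lt_of_lt_of_le h (hm a h2))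
        · simp at h2; omega
      · exact hm x h1
  | case4 a b t h ih =>
    intro _
    obtain ⟨w, m, hw, hm⟩ := ih (by simp)
    refine ⟨a :: w, m, ?_, ?_⟩
    · rw [rpass, if_neg h, hw]; rfl
    · intro x hx
      rcases List.mem_cons.1 hx with h1 | h1
      · subst h1
        have hb : b ∈ w ++ [m] := by
          rw [← hw]; exact (rpass_perm _).mem_iff.2 (by simp)
        rcases List.mem_append.1 hb with h2 | h2
        · exact le_trans (by omega) (hm b h2)
        · simp at h2; omega
      · exact hm x h1

theorem rpass_iterate_sorted : ∀ (k : Nat) (u v : List Int), u.length ≤ k + 1 →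
    v.Pairwise (· ≤ ·) → (∀ a ∈ u, ∀ b ∈ v, a ≤ b) →
    (rpass^[k] (u ++ v)).Pairwise (· ≤ ·) := by
  intro k
  induction k with
  | zero =>
    intro u v hlen hv hd
    match u, hlen with
    | [], _ => simpa using hv
    | [a], _ =>
      simp only [List.cons_append, List.nil_append, Function.iterate_zero, id_eq]
      exact List.pairwise_cons.2 ⟨fun b hb => hd a (by simp) b hb, hv⟩
  | succ k ih =>
    intro u v hlen hv hd
    rw [Function.iterate_succ_apply, rpass_append_sorted u v hv hd]
    match u with
    | [] =>
      rw [show rpass ([] : List Int) = [] from by rw [rpass]]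
      exact ih [] v (by simp) hv (by simp)
    | [a] =>
      rw [show rpass [a] = [a] from by rw [rpass]]
      exact ih [a] v (by simp) hv hd
    | a :: b :: t =>
      obtain ⟨w, m, hw, hm⟩ := rpass_max_last (a :: b :: t) (by simp)
      rw [hw]
      have hperm : (w ++ [m]).Perm (a :: b :: t) := hw ▸ rpass_perm _
      have hmem : ∀ x ∈ w ++ [m], x ∈ a :: b :: t := fun x hx => hperm.mem_iff.1 hx
      have hwlen : w.length + 1 = (a :: b :: t).length := by
        have := hperm.length_eq; simpa using this
      rw [show w ++ [m] ++ v = w ++ (m :: v) by simp]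
      apply ih w (m :: v)
      · omega
      · exact List.pairwise_cons.2 ⟨fun y hy => hd m (hmem m (by simp)) y hy, hv⟩
      · intro x hx y hy
        rcases List.mem_cons.1 hy with h1 | h1
        · subst h1; exact hm x hx
        · exact hd x (hmem x (by simp [hx])) y h1

theorem foldl_pass_eq_iterate (ids : List Nat) :
    ∀ l : List Int, ids.foldl (fun acc _ => pvPass acc) l = rpass^[ids.length] l := by
  induction ids with
  | nil => intro l; rfl
  | cons i is ih =>
    intro l
    simp only [List.foldl_cons, List.length_cons, Function.iterate_succ_apply]
    rw [ih (pvPass l), pvPass_eq_rpass]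

theorem rpass_iterate_perm (k : Nat) (l : List Int) : (rpass^[k] l).Perm l := by
  induction k generalizing l with
  | zero => simp
  | succ k ih => rw [Function.iterate_succ_apply]; exact (ih (rpass l)).trans (rpass_perm l)

theorem sort_number_eq_sorted (l : List Int) :
    PySem.List.sorted l (fun x => x) false = sort_number l := by
  apply PySem.List.sorted_id_eq_of_perm_of_pairwise
  · unfold sort_number
    rw [foldl_pass_eq_iterate]
    simpa using rpass_iterate_perm (List.range (l.length - 1)).length l
  · unfold sort_number
    rw [foldl_pass_eq_iterate]
    simp only [List.length_range]
    have := rpass_iterate_sorted (l.length - 1) l [] (by omega) (by simp) (by simp)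
    simpa using this

theorem fold_prefix_eq_weighted (g : Int → Int) : ∀ n : Nat,
    ((PySem.List.pyRange 0 (n : Int) 1).foldl
      (fun (st : Int × Int) i => (st.1 + g i, st.2 + (st.1 + g i))) (0, 0)) =
    (((PySem.List.pyRange 0 (n : Int) 1).map g).sum,
     ((PySem.List.pyRange 0 (n : Int) 1).map (fun i => ((n : Int) - i) * g i)).sum) := by
  intro n
  induction n with
  | zero => simp [PySem.List.pyRange_one_eq_nil]
  | succ n ih =>
    have hsplit : PySem.List.pyRange 0 ((n : Int) + 1) 1 =
        PySem.List.pyRange 0 (n : Int) 1 ++ [(n : Int)] :=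
      PySem.List.pyRange_one_succ_right (by positivity)
    push_cast
    rw [hsplit, List.foldl_append, List.map_append, List.map_append, ih]
    simp only [List.foldl_cons, List.foldl_nil, List.map_cons, List.map_nil,
      List.sum_append, List.sum_cons, List.sum_nil]
    simp only [Prod.mk.injEq]
    refine ⟨by ring, ?_⟩
    · have : (List.map (fun i => ((n : Int) + 1 - i) * g i) (PySem.List.pyRange 0 (n : Int) 1)).sum
          = (List.map (fun i => ((n : Int) - i) * g i) (PySem.List.pyRange 0 (n : Int) 1)).sum
            + (List.map g (PySem.List.pyRange 0 (n : Int) 1)).sum := by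
        rw [← PySem.List.sum_map_add_int]
        apply congrArg
        apply List.map_congr_left
        intro a _
        ring
      rw [this]; ring

-- ===== VERDICT (by name: the statement is the Claim_ definition above) =====
theorem ATM_spec : Claim_equal_ATM := by
  intro size num_list _ _
  unfold Spec_ATM ATM ATM_alt
  by_cases h1 : size = 1
  · simp [h1]
  · simp only [if_neg h1]
    rw [sort_number_eq_sorted]
    set s := sort_number num_list with hs
    by_cases hpos : 0 ≤ size
    · obtain ⟨n, rfl⟩ := Int.eq_ofNat_of_zero_le hpos
      rw [fold_prefix_eq_weighted (fun i => PySem.List.pyGetD s i 0) n]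
      rw [PySem.List.foldl_add]
      simp
    · rw [PySem.List.pyRange_one_eq_nil (by omega)]
      simp
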